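-- pv_equiv track=rewrite | github.com/evaldask/advent-of-code-2021 | advent2021/day_12.py | route_filter
-- ===== SOURCE A (Python) =====
-- def route_filter(route, limit):
--     if limit == 1:
--         return True
--
--     seen = {}
--     for item in route:
--         if item.isupper():
--             continue
--
--         if item in seen:
--             return True
--
--         seen[item] = True
--
--     return False
-- ===== SOURCE B (Python) =====
-- def route_filter(route, limit):
--     if limit == 1:
--         return True
--     lows = sorted(x for x in route if not x.isupper())
--     return any(a == b for a, b in zip(lows, lows[1:]))
-- ===== Notes on version B (the rewrite author's own statement) =====
-- stated objective: alternative
-- what changed: Replaced A's incremental seen-dict with early exit by sorting the non-uppercase nodes and scanning adjacent pairs for an equal neighbour (duplicates are adjacent after sorting).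
import Mathlib
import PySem

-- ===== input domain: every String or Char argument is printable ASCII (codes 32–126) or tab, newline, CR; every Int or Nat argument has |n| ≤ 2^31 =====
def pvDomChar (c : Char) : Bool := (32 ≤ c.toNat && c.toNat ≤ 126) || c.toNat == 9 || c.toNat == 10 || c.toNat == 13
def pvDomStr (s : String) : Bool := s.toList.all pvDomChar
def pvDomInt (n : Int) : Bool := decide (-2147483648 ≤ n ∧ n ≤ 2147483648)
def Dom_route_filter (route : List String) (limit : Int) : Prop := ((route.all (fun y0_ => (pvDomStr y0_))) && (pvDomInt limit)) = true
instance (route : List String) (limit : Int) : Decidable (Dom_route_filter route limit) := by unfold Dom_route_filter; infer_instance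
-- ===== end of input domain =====

-- B replaces A's incremental seen-dict loop with early exit by sorting the non-uppercase
-- nodes and scanning adjacent pairs for an equal neighbour (objective: alternative; not faster).

-- Python str.isupper, ported by hand (exact on the ASCII domain: a char is cased iff isalpha):
-- true iff the string contains a cased char and no lowercase char.
def pyStrIsupper (s : String) : Bool :=
  s.toList.any PySem.Chars.isalpha && s.toList.all (fun c => !PySem.Chars.islower c)

-- ===== PORT A =====
def routeFilterLoopA : List String → PySem.Dict String Bool → Bool
  | [], _ => false
  | item :: rest, seen =>
    if pyStrIsupper item then routeFilterLoopA rest seen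
    else if PySem.Dict.contains seen item then true
    else routeFilterLoopA rest (PySem.Dict.insert seen item true)

def route_filter (route : List String) (limit : Int) : Bool :=
  if limit == 1 then true
  else routeFilterLoopA route PySem.Dict.empty

-- ===== PORT B =====
def route_filter_alt (route : List String) (limit : Int) : Bool :=
  if limit == 1 then true
  else
    let lows := PySem.List.sorted (route.filter (fun x => !pyStrIsupper x)) (fun x => x) false
    (List.zip lows lows.tail).any (fun p => p.1 == p.2)

-- ===== PRECONDITION & SPEC =====
def Spec_route_filter (route : List String) (limit : Int) (out : Bool) : Prop := out = route_filter_alt route limit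
instance (route : List String) (limit : Int) (out : Bool) : Decidable (Spec_route_filter route limit out) := by unfold Spec_route_filter; infer_instance

-- ===== CLAIM (what is proved, stated in full; the proofs are below) =====
def Claim_equal_route_filter : Prop := ∀ (route : List String) (limit : Int), Dom_route_filter route limit → Spec_route_filter route limit (route_filter route limit)

-- ===== LEMMAS AND PROOFS =====

-- no adjacent equal pair ↔ the chain of adjacent disequalities
theorem any_zip_tail_eq_false_iff (s : List String) :
    ((List.zip s s.tail).any (fun p => p.1 == p.2) = false) ↔ List.IsChain (· ≠ ·) s := by
  induction s with
  | nil => simp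
  | cons a t ih =>
    cases t with
    | nil => simp
    | cons b u =>
      simp only [List.tail_cons, List.zip_cons_cons, List.any_cons, Bool.or_eq_false_iff,
        List.isChain_cons_cons, beq_eq_false_iff_ne, ne_eq]
      constructor
      · rintro ⟨h1, h2⟩
        exact ⟨h1, (ih).mp (by simpa using h2)⟩
      · rintro ⟨h1, h2⟩
        exact ⟨h1, by simpa using (ih).mpr h2⟩

-- adjacent ≤ plus adjacent ≠ gives adjacent <
theorem isChain_lt_of_le_ne (s : List String)
    (hle : List.IsChain (· ≤ ·) s) (hne : List.IsChain (· ≠ ·) s) :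
    List.IsChain (· < ·) s := by
  induction s with
  | nil => exact List.IsChain.nil
  | cons a t ih =>
    cases t with
    | nil => exact List.IsChain.singleton a
    | cons b u =>
      rw [List.isChain_cons_cons] at hle hne ⊢
      exact ⟨lt_of_le_of_ne hle.1 hne.1, ih hle.2 hne.2⟩

-- on a sorted list: no adjacent equal pair ↔ no duplicates
theorem sorted_adj_iff_nodup (l : List String) :
    (((List.zip (PySem.List.sorted l (fun x => x) false)
        (PySem.List.sorted l (fun x => x) false).tail).any (fun p => p.1 == p.2)) = false)
      ↔ l.Nodup := by
  set s := PySem.List.sorted l (fun x => x) false with hs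
  have hperm : s.Perm l := PySem.List.sorted_perm l (fun x => x) false
  have hle : s.Pairwise (· ≤ ·) := by
    have := PySem.List.sorted_pairwise l (fun x => x)
    simpa using this
  rw [any_zip_tail_eq_false_iff]
  constructor
  · intro hch
    have hlt : List.IsChain (· < ·) s := isChain_lt_of_le_ne s hle.isChain hch
    have hplt : s.Pairwise (· < ·) := List.isChain_iff_pairwise.mp hlt
    exact hperm.nodup_iff.mp (hplt.imp ne_of_lt)
  · intro hnd
    exact (hperm.nodup_iff.mpr hnd).isChain

-- A's loop returns false exactly when the already-seen keys plus the remaining non-upper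
-- items are all distinct
theorem loopA_false_iff (xs : List String) :
    ∀ seen : PySem.Dict String Bool, seen.keys.Nodup →
      (routeFilterLoopA xs seen = false ↔
        (seen.keys ++ xs.filter (fun x => !pyStrIsupper x)).Nodup) := by
  induction xs with
  | nil =>
    intro seen h
    simpa [routeFilterLoopA] using h
  | cons x xs ih =>
    intro seen h
    by_cases hx : pyStrIsupper x = true
    · simpa [routeFilterLoopA, hx] using ih seen h
    · by_cases hc : PySem.Dict.contains seen x = true
      · have hxk : x ∈ seen.keys := (PySem.Dict.contains_iff_mem_keys seen x).mp hc
        have hmem : x ∈ List.filter (fun y => !pyStrIsupper y) (x :: xs) :=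
          List.mem_filter.mpr ⟨List.mem_cons_self, by simp [hx]⟩
        simp only [routeFilterLoopA, hx, hc, Bool.false_eq_true, if_false, if_true]
        constructor
        · intro hfalse; cases hfalse
        · intro hnd
          exact absurd hmem (List.disjoint_of_nodup_append hnd hxk)
      · have hcf : PySem.Dict.contains seen x = false := by
          cases hcc : PySem.Dict.contains seen x with
          | false => rfl
          | true => exact absurd hcc hc
        have hkeys : (PySem.Dict.insert seen x true).keys = seen.keys ++ [x] :=
          PySem.Dict.keys_insert_of_not_contains seen true hcf
        have hnodk : (PySem.Dict.insert seen x true).keys.Nodup :=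
          PySem.Dict.nodup_keys_insert seen x true h
        have this1 := ih (PySem.Dict.insert seen x true) hnodk
        rw [hkeys] at this1
        simp only [List.append_assoc, List.singleton_append] at this1
        simpa [routeFilterLoopA, hcf, hx, List.filter_cons] using this1

theorem route_filter_eq_alt (route : List String) (limit : Int) :
    route_filter route limit = route_filter_alt route limit := by
  unfold route_filter route_filter_alt
  by_cases hl : (limit == 1) = true
  · simp [hl]
  · simp only [hl, Bool.false_eq_true, if_false]
    have h := loopA_false_iff route PySem.Dict.empty (by simp [PySem.Dict.keys_empty])
    rw [PySem.Dict.keys_empty, List.nil_append] at h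
    set lows := route.filter (fun x => !pyStrIsupper x) with hlows
    have hadj := sorted_adj_iff_nodup lows
    cases hA : routeFilterLoopA route PySem.Dict.empty with
    | false => simpa using (hadj.mpr (h.mp hA)).symm
    | true =>
      have hnnd : ¬ lows.Nodup := fun hnd => by
        have := h.mpr hnd
        rw [hA] at this; cases this
      cases hB : (List.zip (PySem.List.sorted lows (fun x => x) false)
          (PySem.List.sorted lows (fun x => x) false).tail).any (fun p => p.1 == p.2) with
      | true => rfl
      | false => exact absurd (hadj.mp hB) hnnd

-- ===== VERDICT (by name: the statement is the Claim_ definition above) =====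
theorem route_filter_spec : Claim_equal_route_filter := by
  intro route limit _
  exact route_filter_eq_alt route limit
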